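-- pv_equiv track=rewrite | github.com/juanigremes/Introduccion-a-la-programacion | Python/parcialFiltrado2.py | ganoX
-- ===== SOURCE A (Python) =====
-- def ganoX (columna: list[str]) -> bool:
--     res = False
--     contadorConsecutivosMax = 0
--     contadorConsecutivos: int = 0
--     for letra in columna:
--         if letra == 'X':
--             contadorConsecutivos += 1
--         else:
--             if contadorConsecutivosMax < contadorConsecutivos:
--                 contadorConsecutivosMax = contadorConsecutivos
--             contadorConsecutivos = 0
--         if contadorConsecutivosMax < contadorConsecutivos:
--             contadorConsecutivosMax = contadorConsecutivos
--     if contadorConsecutivosMax >= 3: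
--         res = True
--     return res
-- ===== SOURCE B (Python) =====
-- def ganoX(columna: list[str]) -> bool:
--     return any(columna[i] == 'X' and columna[i + 1] == 'X' and columna[i + 2] == 'X'
--                for i in range(len(columna) - 2))
-- ===== Notes on version B (the rewrite author's own statement) =====
-- stated objective: simpler
-- what changed: Replaces the running-counter/maximum loop by a single sliding-window any() over length-3 windows of all-'X' elements.
import Mathlib
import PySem

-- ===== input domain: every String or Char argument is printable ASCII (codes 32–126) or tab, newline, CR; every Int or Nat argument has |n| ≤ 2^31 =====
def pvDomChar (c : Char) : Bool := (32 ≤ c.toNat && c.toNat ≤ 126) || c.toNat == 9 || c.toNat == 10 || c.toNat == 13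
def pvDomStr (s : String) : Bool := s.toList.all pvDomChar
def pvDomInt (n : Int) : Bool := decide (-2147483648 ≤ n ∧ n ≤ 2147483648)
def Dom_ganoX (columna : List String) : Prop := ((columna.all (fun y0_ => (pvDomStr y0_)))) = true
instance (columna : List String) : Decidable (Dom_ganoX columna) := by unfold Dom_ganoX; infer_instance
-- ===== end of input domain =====

-- B replaces A's running-counter/max loop by a sliding-window any() over all length-3 windows (simpler).

-- ===== PORT A =====
-- the for-loop of A: state (contadorConsecutivosMax, contadorConsecutivos)
def ganoXLoop : List String → Int → Int → Int × Int
  | [], mx, cur => (mx, cur)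
  | letra :: rest, mx, cur =>
    if letra = "X" then
      -- cur incremented, then the unconditional 'if mx < cur' update
      ganoXLoop rest (if mx < cur + 1 then cur + 1 else mx) (cur + 1)
    else
      -- else-branch update of mx, cur reset; second 'if' is vacuous since cur = 0 ≤ mx, kept literally
      let mx1 := if mx < cur then cur else mx
      ganoXLoop rest (if mx1 < 0 then 0 else mx1) 0

def ganoX (columna : List String) : Bool :=
  let res := false
  let p := ganoXLoop columna 0 0
  if p.1 ≥ 3 then true else res

-- ===== PORT B =====
-- any over range(len-2); indices i, i+1, i+2 are always in range, so getD "" is exact here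
def ganoX_alt (columna : List String) : Bool :=
  (List.range (columna.length - 2)).any fun i =>
    columna.getD i "" == "X" && columna.getD (i + 1) "" == "X" && columna.getD (i + 2) "" == "X"

-- ===== PRECONDITION & SPEC =====
def Spec_ganoX (columna : List String) (out : Bool) : Prop := out = ganoX_alt columna
instance (columna : List String) (out : Bool) : Decidable (Spec_ganoX columna out) := by unfold Spec_ganoX; infer_instance

-- ===== CLAIM (what is proved, stated in full; the proofs are below) =====
def Claim_equal_ganoX : Prop := ∀ (columna : List String), Dom_ganoX columna → Spec_ganoX columna (ganoX columna)

-- ===== LEMMAS AND PROOFS =====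

-- structural "three consecutive X" predicate, bridge between the two ports
def hasRun3 : List String → Bool
  | a :: b :: c :: rest => (a == "X" && b == "X" && c == "X") || hasRun3 (b :: c :: rest)
  | _ => false

-- length of the leading run of "X"
def leadX : List String → Int
  | [] => 0
  | a :: rest => if a = "X" then 1 + leadX rest else 0

theorem leadX_nonneg (ls : List String) : 0 ≤ leadX ls := by
  induction ls with
  | nil => simp [leadX]
  | cons a rest ih => simp only [leadX]; split_ifs <;> omega

theorem hasRun3_cons (x : String) (ls : List String) :
    hasRun3 (x :: ls) = true ↔ ((x = "X" ∧ 2 ≤ leadX ls) ∨ hasRun3 ls = true) := by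
  match ls with
  | [] => simp [hasRun3, leadX]
  | [b] =>
    by_cases hb : b = "X" <;> simp [hasRun3, leadX, hb]
  | b :: c :: rest =>
    have h := leadX_nonneg rest
    by_cases hb : b = "X" <;> by_cases hc : c = "X" <;> by_cases hx : x = "X" <;>
      (simp [hasRun3, leadX, hb, hc, hx] <;> omega)

theorem leadX3_run (ls : List String) (h : 3 ≤ leadX ls) : hasRun3 ls = true := by
  match ls with
  | [] => simp [leadX] at h
  | a :: rest =>
    rw [hasRun3_cons]
    simp only [leadX] at h
    split_ifs at h with ha
    · exact Or.inl ⟨ha, by omega⟩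
    · omega

-- invariant of A's loop
theorem ganoXLoop_char (ls : List String) (mx cur : Int)
    (h0 : 0 ≤ cur) (hle : cur ≤ mx) :
    (3 ≤ (ganoXLoop ls mx cur).1) ↔ (3 ≤ mx ∨ 3 ≤ cur + leadX ls ∨ hasRun3 ls = true) := by
  induction ls generalizing mx cur with
  | nil =>
    simp only [ganoXLoop, leadX, hasRun3]
    constructor
    · intro h; left; exact h
    · rintro (h | h | h) <;> first | omega | simp at h
  | cons a rest ih =>
    have hl := leadX_nonneg rest
    by_cases ha : a = "X"
    · simp only [ganoXLoop, leadX, ha, reduceIte]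
      rw [hasRun3_cons]
      simp only [true_and]
      by_cases hm : mx < cur + 1
      · rw [if_pos hm, ih (cur + 1) (cur + 1) (by omega) le_rfl]
        constructor
        · rintro (h | h | h)
          · right; left; omega
          · right; left; omega
          · right; right; right; exact h
        · rintro (h | h | (h | h))
          · left; omega
          · right; left; omega
          · right; left; omega
          · right; right; exact h
      · rw [if_neg hm, ih mx (cur + 1) (by omega) (by omega)]
        constructor
        · rintro (h | h | h)
          · left; exact h
          · right; left; omega
          · right; right; right; exact h
        · rintro (h | h | (h | h))
          · left; exact h
          · right; left; omega
          · right; left; omega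
          · right; right; exact h
    · simp only [ganoXLoop, leadX, ha, reduceIte]
      rw [hasRun3_cons]
      have hmx1 : (if mx < cur then cur else mx) = mx := by split_ifs <;> omega
      rw [hmx1]
      have hmx2 : (if mx < 0 then 0 else mx) = mx := by split_ifs <;> omega
      rw [hmx2, ih mx 0 le_rfl (by omega)]
      constructor
      · rintro (h | h | h)
        · left; exact h
        · right; right; right; exact leadX3_run rest (by omega)
        · right; right; right; exact h
      · rintro (h | h | (h | h))
        · left; exact h
        · left; omega
        · exact absurd h.1 ha
        · right; right; exact h

theorem ganoX_eq_hasRun3 (ls : List String) : ganoX ls = hasRun3 ls := by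
  simp only [ganoX]
  have h := ganoXLoop_char ls 0 0 le_rfl le_rfl
  have hl := leadX_nonneg ls
  by_cases hr : hasRun3 ls = true
  · have : 3 ≤ (ganoXLoop ls 0 0).1 := h.mpr (Or.inr (Or.inr hr))
    simp [this, hr, ge_iff_le]
  · have hr' : hasRun3 ls = false := by simp_all
    by_cases hlead : 3 ≤ leadX ls
    · exact absurd (leadX3_run ls hlead) hr
    · have hn : ¬ 3 ≤ (ganoXLoop ls 0 0).1 := by
        intro hc
        rcases h.mp hc with h3 | h3 | h3
        · omega
        · omega
        · exact hr h3
      simp [ge_iff_le, hn, hr']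

-- shift lemma for any over range
theorem any_range_succ (n : ℕ) (f : ℕ → Bool) :
    (List.range (n + 1)).any f = (f 0 || (List.range n).any fun i => f (i + 1)) := by
  rw [List.range_succ_eq_map]
  simp [List.any_map, Function.comp_def, Nat.succ_eq_add_one]

theorem ganoX_alt_eq_hasRun3 (ls : List String) : ganoX_alt ls = hasRun3 ls := by
  match ls with
  | [] => rfl
  | [a] => rfl
  | [a, b] => rfl
  | a :: b :: c :: rest =>
    have ih := ganoX_alt_eq_hasRun3 (b :: c :: rest)
    simp only [ganoX_alt, List.length_cons] at ih ⊢
    have hlen : rest.length + 1 + 1 + 1 - 2 = rest.length + 1 := by omega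
    have hlen2 : rest.length + 1 + 1 - 2 = rest.length := by omega
    rw [hlen, any_range_succ]
    rw [hlen2] at ih
    simp only [List.getD_cons_zero, List.getD_cons_succ] at ih ⊢
    rw [ih, hasRun3]

-- ===== VERDICT (by name: the statement is the Claim_ definition above) =====
theorem ganoX_spec : Claim_equal_ganoX := by
  intro columna _
  unfold Spec_ganoX
  rw [ganoX_eq_hasRun3, ganoX_alt_eq_hasRun3]
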